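-- pv_equiv track=rewrite | github.com/RenatoAAraujo/possible_sum_values | generator.py | sub_lists_with_sum
-- ===== SOURCE A (Python) =====
-- def sub_lists_with_sum(total_numbers_to_be_used: bool, target: int):
--     if total_numbers_to_be_used <= 0:
--         raise ValueError("\"total_numbers\" must be bigger than 0.")
--     elif total_numbers_to_be_used == 1:
--         yield [target]
--     else:
--         for value in range(target + 1):
--             for permutation in sub_lists_with_sum(total_numbers_to_be_used - 1, target - value):
--                 yield [value, ] + permutation
-- ===== SOURCE B (Python) =====
-- from itertools import combinations
--
--
-- def sub_lists_with_sum(total_numbers_to_be_used: bool, target: int):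
--     if total_numbers_to_be_used <= 0:
--         raise ValueError("\"total_numbers\" must be bigger than 0.")
--     n = total_numbers_to_be_used
--     if n > 1 and target < 0:
--         return  # a negative total has no compositions into n >= 2 parts
--     # stars-and-bars: choose n-1 divider positions among target+n-1 slots;
--     # the gaps between consecutive dividers are the parts (lexicographic order).
--     for dividers in combinations(range(target + n - 1), n - 1):
--         prev = -1
--         parts = []
--         for p in dividers:
--             parts.append(p - prev - 1)
--             prev = p
--         parts.append((target + n - 1) - prev - 1)
--         yield parts
-- ===== Notes on version B (the rewrite author's own statement) =====
-- stated objective: alternative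
-- what changed: Replaces A's recursive generator over the first part's value by a stars-and-bars enumeration: itertools.combinations picks divider positions among target+n-1 slots and each composition is read off as the gaps between consecutive dividers, in the same lexicographic order.
import Mathlib
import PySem

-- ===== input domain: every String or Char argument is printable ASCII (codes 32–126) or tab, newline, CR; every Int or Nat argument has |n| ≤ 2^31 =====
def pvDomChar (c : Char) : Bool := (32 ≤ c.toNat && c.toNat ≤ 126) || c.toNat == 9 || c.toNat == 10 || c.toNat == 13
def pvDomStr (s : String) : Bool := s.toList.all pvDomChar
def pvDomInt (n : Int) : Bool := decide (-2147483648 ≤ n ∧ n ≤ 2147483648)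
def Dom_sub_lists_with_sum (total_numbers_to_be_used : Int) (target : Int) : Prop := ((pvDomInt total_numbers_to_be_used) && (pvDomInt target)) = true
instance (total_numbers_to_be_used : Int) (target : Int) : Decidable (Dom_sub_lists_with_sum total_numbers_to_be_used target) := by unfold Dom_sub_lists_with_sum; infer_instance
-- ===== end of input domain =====

-- B replaces A's recursion by stars-and-bars: enumerate divider-position combinations and
-- read off the gaps (objective: alternative algorithm, same output order).

-- ===== PORT A =====
-- Port of A's generator, collected as a list; the `<= 0` branch raises ValueError in
-- Python and is excluded by Pre_ below (the port returns [] there, unclaimed).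
def sub_lists_with_sum (total_numbers_to_be_used : Int) (target : Int) : List (List Int) :=
  if total_numbers_to_be_used ≤ 0 then []
  else if total_numbers_to_be_used = 1 then [[target]]
  else (PySem.List.pyRange 0 (target + 1) 1).flatMap
    (fun value =>
      (sub_lists_with_sum (total_numbers_to_be_used - 1) (target - value)).map
        (fun permutation => value :: permutation))
termination_by total_numbers_to_be_used.toNat
decreasing_by omega

-- ===== PORT B =====
-- itertools.combinations(pool, k): lexicographic combinations, exact order
-- (tuples starting with the first element come first); like itertools it emits
-- nothing as soon as k exceeds the pool's length.
def pvCombos : List Int → Nat → List (List Int)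
  | _, 0 => [[]]
  | [], _ + 1 => []
  | x :: rest, k + 1 =>
    if rest.length + 1 < k + 1 then []
    else ((pvCombos rest k).map (fun c => x :: c)) ++ pvCombos rest (k + 1)

-- the inner loop of Source B: prev starts at -1, each divider p contributes p - prev - 1,
-- and the final append contributes last - prev - 1.
def pvGaps (last : Int) (prev : Int) : List Int → List Int
  | [] => [last - prev - 1]
  | p :: ps => (p - prev - 1) :: pvGaps last p ps

def sub_lists_with_sum_alt (total_numbers_to_be_used : Int) (target : Int) : List (List Int) :=
  if total_numbers_to_be_used ≤ 0 then []
  else if 1 < total_numbers_to_be_used ∧ target < 0 then []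
  else
    (pvCombos (PySem.List.pyRange 0 (target + total_numbers_to_be_used - 1) 1)
        (total_numbers_to_be_used - 1).toNat).map
      (fun dividers => pvGaps (target + total_numbers_to_be_used - 1) (-1) dividers)

-- ===== PRECONDITION & SPEC =====
-- A raises ValueError exactly when total_numbers_to_be_used <= 0; those inputs are excluded.
def Pre_sub_lists_with_sum (total_numbers_to_be_used : Int) (target : Int) : Prop :=
  0 < total_numbers_to_be_used
instance (total_numbers_to_be_used : Int) (target : Int) : Decidable (Pre_sub_lists_with_sum total_numbers_to_be_used target) := by unfold Pre_sub_lists_with_sum; infer_instance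

def pvWitness_sub_lists_with_sum : Int × Int := (3, 4)

def Spec_sub_lists_with_sum (total_numbers_to_be_used : Int) (target : Int) (out : List (List Int)) : Prop := out = sub_lists_with_sum_alt total_numbers_to_be_used target
instance (total_numbers_to_be_used : Int) (target : Int) (out : List (List Int)) : Decidable (Spec_sub_lists_with_sum total_numbers_to_be_used target out) := by unfold Spec_sub_lists_with_sum; infer_instance

-- ===== CLAIM (what is proved, stated in full; the proofs are below) =====
def Claim_equal_sub_lists_with_sum : Prop := ∀ (total_numbers_to_be_used : Int) (target : Int), Dom_sub_lists_with_sum total_numbers_to_be_used target → Pre_sub_lists_with_sum total_numbers_to_be_used target → Spec_sub_lists_with_sum total_numbers_to_be_used target (sub_lists_with_sum total_numbers_to_be_used target)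

-- ===== LEMMAS AND PROOFS =====

theorem pvCombos_nil_of_lt : ∀ (xs : List Int) (k : Nat), xs.length < k → pvCombos xs k = []
  | _, 0, h => by omega
  | [], _ + 1, _ => rfl
  | x :: rest, k + 1, h => by
    simp only [pvCombos]
    rw [if_pos (by simp only [List.length_cons] at h; omega)]

theorem pvCombos_cons (x : Int) (rest : List Int) (k : Nat) :
    pvCombos (x :: rest) (k + 1) = ((pvCombos rest k).map (fun c => x :: c)) ++ pvCombos rest (k + 1) := by
  by_cases h : rest.length + 1 < k + 1
  · rw [show pvCombos (x :: rest) (k + 1) = [] from by simp only [pvCombos, if_pos h]]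
    rw [pvCombos_nil_of_lt rest k (by omega), pvCombos_nil_of_lt rest (k + 1) (by omega)]
    rfl
  · simp only [pvCombos, if_neg h]

-- peeling the first chosen divider: combinations of a range, grouped by first element
theorem pvCombos_range_flat_aux (k : Nat) (E : Int) : ∀ (n : Nat) (a : Int), (E - a).toNat ≤ n →
    pvCombos (PySem.List.pyRange a E 1) (k + 1)
      = (PySem.List.pyRange a E 1).flatMap
          (fun p => (pvCombos (PySem.List.pyRange (p + 1) E 1) k).map (fun c => p :: c)) := by
  intro n
  induction n with
  | zero =>
    intro a ha
    rw [PySem.List.pyRange_one_eq_nil (by omega)]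
    rfl
  | succ n ih =>
    intro a ha
    by_cases h : a < E
    · rw [PySem.List.pyRange_one_cons h]
      rw [pvCombos_cons, List.flatMap_cons, ih (a + 1) (by omega)]
    · rw [PySem.List.pyRange_one_eq_nil (by omega)]
      rfl

theorem pvCombos_range_flat (k : Nat) (a E : Int) :
    pvCombos (PySem.List.pyRange a E 1) (k + 1)
      = (PySem.List.pyRange a E 1).flatMap
          (fun p => (pvCombos (PySem.List.pyRange (p + 1) E 1) k).map (fun c => p :: c)) :=
  pvCombos_range_flat_aux k E (E - a).toNat a le_rfl

-- A with at least two parts and a negative target yields nothing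
theorem A_eq_nil (n t : Int) (hn : 1 < n) (ht : t < 0) : sub_lists_with_sum n t = [] := by
  rw [sub_lists_with_sum]
  rw [if_neg (by omega), if_neg (by omega)]
  rw [PySem.List.pyRange_one_eq_nil (by omega)]
  rfl

-- main invariant: decoding the combinations of any shifted range gives A's output
theorem pvMain : ∀ (m : Nat) (a t : Int),
    (pvCombos (PySem.List.pyRange a (a + t + m) 1) m).map (pvGaps (a + t + m) (a - 1))
      = sub_lists_with_sum ((m : Int) + 1) t := by
  intro m
  induction m with
  | zero =>
    intro a t
    rw [sub_lists_with_sum]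
    simp only [pvCombos, Nat.cast_zero, add_zero, zero_add]
    norm_num [pvGaps]
  | succ m ih =>
    intro a t
    rw [pvCombos_range_flat m]
    rw [List.map_flatMap]
    rw [show ((m + 1 : Nat) : Int) = (m : Int) + 1 from by push_cast; ring]
    have hinner : ∀ p : Int,
        List.map (pvGaps (a + t + ((m : Int) + 1)) (a - 1))
            (List.map (fun c => p :: c)
              (pvCombos (PySem.List.pyRange (p + 1) (a + t + ((m : Int) + 1)) 1) m))
          = List.map (fun c => (p - a) :: c)
              (sub_lists_with_sum ((m : Int) + 1) (t - (p - a))) := by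
      intro p
      rw [List.map_map]
      have h1 : (pvGaps (a + t + ((m : Int) + 1)) (a - 1)) ∘ (fun c => p :: c)
          = (fun c => (p - a) :: c) ∘ (pvGaps (a + t + ((m : Int) + 1)) p) := by
        funext c
        simp only [Function.comp, pvGaps, List.cons.injEq, and_true]
        ring
      rw [h1, ← List.map_map]
      congr 1
      have h2 := ih (p + 1) (t - (p - a))
      rw [show (p + 1) + (t - (p - a)) + (m : Int) = a + t + ((m : Int) + 1) from by ring,
        show (p + 1) - 1 = p from by ring] at h2
      exact h2
    simp only [hinner]
    have hA : sub_lists_with_sum (((m : Int) + 1) + 1) t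
        = (PySem.List.pyRange 0 (t + 1) 1).flatMap
            (fun v => (sub_lists_with_sum ((m : Int) + 1) (t - v)).map (fun c => v :: c)) := by
      rw [sub_lists_with_sum]
      have hm0 : (0 : Int) ≤ (m : Int) := Int.natCast_nonneg m
      rw [if_neg (by omega), if_neg (by omega)]
      norm_num
    rw [hA]
    rw [PySem.List.pyRange_one a (a + t + ((m : Int) + 1)), PySem.List.pyRange_one 0 (t + 1)]
    rw [List.flatMap_map, List.flatMap_map]
    simp only [add_sub_cancel_left, zero_add, sub_zero]
    rw [show a + t + ((m : Int) + 1) - a = t + ((m : Int) + 1) from by ring]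
    have hm0 : (0 : Int) ≤ (m : Int) := Int.natCast_nonneg m
    have hnil : ∀ k : Nat, (t + 1).toNat ≤ k → k < (t + ((m : Int) + 1)).toNat →
        List.map (fun c => (k : Int) :: c) (sub_lists_with_sum ((m : Int) + 1) (t - (k : Int))) = [] := by
      intro k h1 h2
      rw [A_eq_nil _ _ (by omega) (by omega)]
      rfl
    rw [show (t + ((m : Int) + 1)).toNat = (t + 1).toNat + ((t + ((m : Int) + 1)).toNat - (t + 1).toNat) from by omega]
    rw [List.range_add, List.flatMap_append]
    refine Eq.trans ?_ (List.append_nil _)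
    congr 1
    rw [List.flatMap_eq_nil_iff]
    intro x hx
    simp only [List.mem_map, List.mem_range] at hx
    obtain ⟨k, hk, rfl⟩ := hx
    exact hnil _ (by omega) (by omega)

-- ===== VERDICT (by name: the statement is the Claim_ definition above) =====
theorem sub_lists_with_sum_spec : Claim_equal_sub_lists_with_sum := by
  intro n t _ hpre
  have hn : 0 < n := hpre
  unfold Spec_sub_lists_with_sum sub_lists_with_sum_alt
  rw [if_neg (by omega)]
  by_cases hneg : 1 < n ∧ t < 0
  · rw [if_pos hneg, A_eq_nil n t hneg.1 hneg.2]
  rw [if_neg hneg]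
  have hm : ((n - 1).toNat : Int) = n - 1 := by omega
  have h := pvMain (n - 1).toNat 0 t
  rw [hm] at h
  simp only [zero_add, zero_sub] at h
  rw [show n - 1 + 1 = n by ring] at h
  rw [show t + n - 1 = t + (n - 1) by ring]
  exact h.symm
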